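-- pv_equiv track=rewrite | github.com/rcc00n/bgm_crm | store/admin.py | _matches_autofill_url
-- ===== SOURCE A (Python) =====
-- def _matches_autofill_url(url: str, template: str) -> bool:
--     if not url:
--         return False
--     if "{seed}" not in template:
--         return url == template
--     parts = template.split("{seed}")
--     if not url.startswith(parts[0]) or not url.endswith(parts[-1]):
--         return False
--     pos = len(parts[0])
--     for mid in parts[1:-1]:
--         idx = url.find(mid, pos)
--         if idx == -1:
--             return False
--         pos = idx + len(mid)
--     return True
-- ===== SOURCE B (Python) =====
-- def _matches_autofill_url(url: str, template: str) -> bool: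
--     if not url:
--         return False
--     if "{seed}" not in template:
--         return url == template
--     parts = template.split("{seed}")
--     if not url.endswith(parts[-1]):
--         return False
--     return _match_front(url, parts[:-1])
--
--
-- def _match_front(s: str, pieces: list) -> bool:
--     # s starts with pieces[0] and contains the remaining pieces in order after it
--     if not s.startswith(pieces[0]):
--         return False
--     return _contains_in_order(s[len(pieces[0]):], pieces[1:])
--
--
-- def _contains_in_order(s: str, pieces: list) -> bool:
--     # do the pieces occur in s, in order and disjointly?  backtracking over the gap length
--     if not pieces:
--         return True
--     m = pieces[0]
--     return any(s[g:g + len(m)] == m and _contains_in_order(s[g + len(m):], pieces[1:])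
--                for g in range(len(s) + 1))
-- ===== Notes on version B (the rewrite author's own statement) =====
-- stated objective: alternative
-- what changed: A scans the url with a greedy left-to-right str.find loop from an advancing position; B decides the same match by a recursive backtracking search (any() over every gap length) for an ordered disjoint occurrence of the middle chunks, consuming the string by slicing instead of tracking an index.
import Mathlib
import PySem

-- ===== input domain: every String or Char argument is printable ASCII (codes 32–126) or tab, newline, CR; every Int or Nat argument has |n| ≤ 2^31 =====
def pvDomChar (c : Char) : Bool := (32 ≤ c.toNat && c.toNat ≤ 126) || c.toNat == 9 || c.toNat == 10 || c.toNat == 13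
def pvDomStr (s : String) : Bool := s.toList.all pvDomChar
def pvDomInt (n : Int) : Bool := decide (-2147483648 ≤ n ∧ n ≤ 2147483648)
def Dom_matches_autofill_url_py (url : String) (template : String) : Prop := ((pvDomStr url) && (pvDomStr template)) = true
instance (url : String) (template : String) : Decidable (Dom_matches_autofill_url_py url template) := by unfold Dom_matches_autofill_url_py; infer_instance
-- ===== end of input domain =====

-- B replaces A's greedy left-to-right find loop by a recursive backtracking search (over every
-- gap length) for an ordered disjoint occurrence of the middle chunks, consuming string slices
-- instead of tracking an index; return values agree on all inputs.

def pvSeed : List Char := ['{', 's', 'e', 'e', 'd', '}']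

-- ===== PORT A =====
-- the `for mid in parts[1:-1]` loop of A: pos-tracking greedy left-to-right `find`
def matchesGoA (url : List Char) (mids : List (List Char)) (pos : Int) : Bool :=
  match mids with
  | [] => true
  | m :: rest =>
    let idx := PySem.Chars.findFrom url m pos
    if idx = -1 then false else matchesGoA url rest (idx + m.length)

def matches_autofill_url_py (url : String) (template : String) : Bool :=
  let ul := url.toList
  let tl := template.toList
  if ul.isEmpty then false                                  -- if not url: return False
  else if !(PySem.Chars.isIn pvSeed tl) then ul == tl       -- if "{seed}" not in template: return url == template
  else
    let parts := PySem.Chars.splitOn tl pvSeed              -- parts = template.split("{seed}")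
    match parts with
    | [] => false                                           -- unreachable: str.split never returns []
    | p0 :: rest =>
      let plast := (p0 :: rest).getLast (List.cons_ne_nil _ _)    -- parts[-1]
      if !(PySem.Chars.startswith ul p0) || !(PySem.Chars.endswith ul plast) then false
      else
        let mids := PySem.List.slice (p0 :: rest) (some 1) (some (-1))   -- parts[1:-1]
        matchesGoA ul mids (p0.length : Int)                -- pos = len(parts[0]); the find loop

-- ===== PORT B =====
-- _contains_in_order(s, pieces): the pieces occur in s, in order and disjointly (backtracking over gaps)
def containsInOrderB (s : List Char) : List (List Char) → Bool
  | [] => true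
  | m :: rest =>                                            -- any(s[g:g+len(m)] == m and _contains_in_order(s[g+len(m):], pieces[1:]) for g in range(len(s)+1))
    (List.range (s.length + 1)).any fun g =>
      (PySem.List.slice s (some (g : Int)) (some ((g : Int) + (m.length : Int))) == m)
        && containsInOrderB (PySem.List.slice s (some ((g : Int) + (m.length : Int))) none) rest

-- _match_front(s, pieces): s starts with pieces[0], then contains the rest in order
def matchFrontB (s : List Char) (pieces : List (List Char)) : Bool :=
  match pieces with
  | [] => false                                             -- unreachable: pieces[0] exists at every call
  | q :: qs =>
    if !(PySem.Chars.startswith s q) then false             -- if not s.startswith(pieces[0]): return False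
    else containsInOrderB (PySem.List.slice s (some (q.length : Int)) none) qs   -- _contains_in_order(s[len(pieces[0]):], pieces[1:])

def matches_autofill_url_py_alt (url : String) (template : String) : Bool :=
  let ul := url.toList
  let tl := template.toList
  if ul.isEmpty then false                                  -- if not url: return False
  else if !(PySem.Chars.isIn pvSeed tl) then ul == tl       -- if "{seed}" not in template: return url == template
  else
    match PySem.Chars.splitOn tl pvSeed with                -- parts = template.split("{seed}")
    | [] => false                                           -- unreachable: str.split never returns []
    | p0 :: rest =>
      if !(PySem.Chars.endswith ul ((p0 :: rest).getLastD [])) then false   -- if not url.endswith(parts[-1]): return False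
      else matchFrontB ul (PySem.List.slice (p0 :: rest) none (some (-1)))  -- _match_front(url, parts[:-1])

-- ===== PRECONDITION & SPEC =====
def Spec_matches_autofill_url_py (url : String) (template : String) (out : Bool) : Prop := out = matches_autofill_url_py_alt url template
instance (url : String) (template : String) (out : Bool) : Decidable (Spec_matches_autofill_url_py url template out) := by
  unfold Spec_matches_autofill_url_py; infer_instance

-- ===== CLAIM (what is proved, stated in full; the proofs are below) =====
def Claim_equal_matches_autofill_url_py : Prop := ∀ (url : String) (template : String), Dom_matches_autofill_url_py url template → Spec_matches_autofill_url_py url template (matches_autofill_url_py url template)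

-- ===== LEMMAS AND PROOFS =====

-- An ordered disjoint embedding of the middle parts into s, positions ≥ lo, each fitting below hi.
def Emb (s : List Char) (mids : List (List Char)) (lo hi : Nat) : Prop :=
  match mids with
  | [] => True
  | m :: rest => ∃ i : Nat, lo ≤ i ∧ i + m.length ≤ hi ∧ m <+: s.drop i ∧ Emb s rest (i + m.length) hi

-- the pieces occur in s, in order and disjointly (Prop form of B's backtracking search)
def EmbT : List Char → List (List Char) → Prop
  | _, [] => True
  | s, m :: rest => ∃ g : Nat, g + m.length ≤ s.length ∧ m <+: s.drop g ∧ EmbT (s.drop (g + m.length)) rest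

lemma emb_mono (s : List Char) (mids : List (List Char)) {lo lo' hi : Nat}
    (h : Emb s mids lo hi) (hle : lo' ≤ lo) : Emb s mids lo' hi := by
  cases mids with
  | nil => trivial
  | cons m rest =>
    obtain ⟨i, h1, h2, h3, h4⟩ := h
    exact ⟨i, le_trans hle h1, h2, h3, h4⟩

lemma occ_le {s m : List Char} {i : Nat} (h : m <+: s.drop i) (hi : i ≤ s.length) :
    i + m.length ≤ s.length := by
  have := h.length_le
  simp [List.length_drop] at this
  omega

lemma occ_fit {s m : List Char} {i : Nat} (h : m <+: s.drop i) (hm : m ≠ []) :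
    i + m.length ≤ s.length := by
  by_cases hi : i ≤ s.length
  · exact occ_le h hi
  · exfalso
    have : s.drop i = [] := List.drop_eq_nil_of_le (by omega)
    rw [this] at h
    exact hm (List.prefix_nil.mp h)

lemma infix_drop_iff (s m : List Char) (k : Nat) (hk : k ≤ s.length) :
    m <:+: s.drop k ↔ ∃ i : Nat, k ≤ i ∧ i + m.length ≤ s.length ∧ m <+: s.drop i := by
  constructor
  · rintro ⟨u, v, huv⟩
    by_cases hm : m = []
    · subst hm
      exact ⟨k, le_refl _, by simpa using hk, List.nil_prefix⟩
    · have hpre : m <+: (s.drop k).drop u.length := by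
        rw [← huv]; simp
      rw [List.drop_drop] at hpre
      have hfit := occ_fit hpre hm
      refine ⟨k + u.length, by omega, by omega, hpre⟩
  · rintro ⟨i, h1, _, h3⟩
    have : s.drop i = (s.drop k).drop (i - k) := by
      rw [List.drop_drop]; congr 1; omega
    rw [this] at h3
    exact h3.isInfix.trans (List.drop_suffix _ _).isInfix

-- A's loop computes exactly the leftmost-first embedding test.
lemma goA_iff_emb (s : List Char) (mids : List (List Char)) :
    ∀ lo : Nat, lo ≤ s.length →
      (matchesGoA s mids (lo : Int) = true ↔ Emb s mids lo s.length) := by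
  induction mids with
  | nil => intro lo _; simp [matchesGoA, Emb]
  | cons m rest ih =>
    intro lo hlo
    rw [matchesGoA]
    constructor
    · intro h
      simp only at h
      by_cases hneg : PySem.Chars.findFrom s m (lo : Int) = -1
      · simp [hneg] at h
      · obtain ⟨hk, hpre, hmin⟩ := PySem.Chars.findFrom_natCast_spec s m lo hlo hneg
        set idx := PySem.Chars.findFrom s m (lo : Int) with hidx
        have hidx0 : 0 ≤ idx := le_trans (by exact_mod_cast Nat.zero_le lo) hk
        have hbound : idx.toNat + m.length ≤ s.length := by
          by_cases hm : m = []
          · subst hm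
            have : idx.toNat ≤ lo := by
              by_contra hc
              exact hmin lo (le_refl _) (by omega) List.nil_prefix
            simpa using le_trans this hlo
          · exact occ_fit hpre hm
        have hrec : matchesGoA s rest (idx + (m.length : Int)) = true := by
          simpa [hneg] using h
        have hcast : idx + (m.length : Int) = ((idx.toNat + m.length : Nat) : Int) := by
          push_cast; omega
        rw [hcast] at hrec
        have hklo : lo ≤ idx.toNat := by omega
        exact ⟨idx.toNat, hklo, hbound, hpre, (ih _ hbound).mp hrec⟩
    · rintro ⟨i, h1, h2, h3, h4⟩
      have hne : PySem.Chars.findFrom s m (lo : Int) ≠ -1 := by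
        rw [Ne, PySem.Chars.findFrom_natCast_eq_neg_one_iff s m lo hlo, not_not,
            infix_drop_iff s m lo hlo]
        exact ⟨i, h1, h2, h3⟩
      obtain ⟨hk, hpre, hmin⟩ := PySem.Chars.findFrom_natCast_spec s m lo hlo hne
      set idx := PySem.Chars.findFrom s m (lo : Int) with hidx
      have hle : idx.toNat ≤ i := by
        by_contra hc
        exact hmin i h1 (by omega) h3
      have hbound : idx.toNat + m.length ≤ s.length := by omega
      have hrec : Emb s rest (idx.toNat + m.length) s.length :=
        emb_mono s rest h4 (by omega)
      have hcast : idx + (m.length : Int) = ((idx.toNat + m.length : Nat) : Int) := by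
        have hidx0 : 0 ≤ idx := le_trans (by exact_mod_cast Nat.zero_le lo) hk
        push_cast; omega
      simp only [hne, if_false]
      rw [hcast]
      exact (ih _ hbound).mpr hrec

-- str.split always yields at least one piece …
lemma splitOnGo_len_ge (sep : List Char) :
    ∀ (fuel : Nat) (l cur : List Char) (acc : List (List Char)),
      acc.length + 1 ≤ (PySem.Chars.splitOn.go sep fuel l cur acc).length := by
  intro fuel
  induction fuel with
  | zero => intro l cur acc; simp [PySem.Chars.splitOn.go]
  | succ f ih =>
    intro l cur acc
    cases l with
    | nil => simp [PySem.Chars.splitOn.go]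
    | cons c rest =>
      by_cases hp : sep.isPrefixOf (c :: rest)
      · rw [show PySem.Chars.splitOn.go sep (f+1) (c :: rest) cur acc
              = PySem.Chars.splitOn.go sep f (List.drop sep.length (c :: rest)) [] (cur.reverse :: acc) by
            simp [PySem.Chars.splitOn.go, hp]]
        have := ih (List.drop sep.length (c :: rest)) [] (cur.reverse :: acc)
        simp at this ⊢
        omega
      · rw [show PySem.Chars.splitOn.go sep (f+1) (c :: rest) cur acc
              = PySem.Chars.splitOn.go sep f rest (c :: cur) acc by
            simp [PySem.Chars.splitOn.go, hp]]
        exact ih rest (c :: cur) acc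

-- … and at least two pieces when the (nonempty) separator occurs in the string.
lemma splitOnGo_len_two (sep : List Char) (hsep : sep ≠ []) :
    ∀ (fuel : Nat) (l cur : List Char) (acc : List (List Char)),
      sep <:+: l → l.length < fuel →
      acc.length + 2 ≤ (PySem.Chars.splitOn.go sep fuel l cur acc).length := by
  intro fuel
  induction fuel with
  | zero => intro l cur acc _ h; omega
  | succ f ih =>
    intro l cur acc hin hfl
    cases l with
    | nil =>
      exact absurd (List.eq_nil_of_infix_nil hin) hsep
    | cons c rest =>
      by_cases hp : sep.isPrefixOf (c :: rest)
      · rw [show PySem.Chars.splitOn.go sep (f+1) (c :: rest) cur acc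
              = PySem.Chars.splitOn.go sep f (List.drop sep.length (c :: rest)) [] (cur.reverse :: acc) by
            simp [PySem.Chars.splitOn.go, hp]]
        have := splitOnGo_len_ge sep f (List.drop sep.length (c :: rest)) [] (cur.reverse :: acc)
        simp at this ⊢
        omega
      · rw [show PySem.Chars.splitOn.go sep (f+1) (c :: rest) cur acc
              = PySem.Chars.splitOn.go sep f rest (c :: cur) acc by
            simp [PySem.Chars.splitOn.go, hp]]
        have hin' : sep <:+: rest := by
          rcases (List.infix_cons_iff).mp hin with h | h
          · exact absurd ((List.isPrefixOf_iff_prefix).mpr h) hp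
          · exact h
        exact ih rest (c :: cur) acc hin' (by simp at hfl ⊢; omega)

lemma splitOn_two (s sep : List Char) (hsep : sep ≠ []) (hin : sep <:+: s) :
    2 ≤ (PySem.Chars.splitOn s sep).length := by
  have := splitOnGo_len_two sep hsep (s.length + 1) s [] [] hin (by omega)
  simpa [PySem.Chars.splitOn] using this

lemma getLast_eq_getLastD (l : List (List Char)) (h : l ≠ []) : l.getLast h = l.getLastD [] := by
  rw [List.getLastD_eq_getLast?, List.getLast?_eq_some_getLast h]; rfl

lemma slice_one_neg_one (x : List Char) (xs : List (List Char)) :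
    PySem.List.slice (x :: xs) (some 1) (some (-1)) = xs.dropLast := by
  simp [PySem.List.slice, List.dropLast_eq_take]

-- the slice comparison in B's matcher is exactly "m occurs at g and fits"
lemma slice_eq_iff_prefix (s m : List Char) (g : Nat) :
    ((PySem.List.slice s (some (g : Int)) (some ((g : Int) + (m.length : Int))) == m) = true)
      ↔ (m <+: s.drop g ∧ g + m.length ≤ s.length ∨ m = [] ∧ s.length < g) := by
  rw [PySem.List.slice_natCast_add, beq_iff_eq]
  constructor
  · intro h
    by_cases hg : g ≤ s.length
    · have hpre : m <+: s.drop g := h ▸ List.take_prefix _ _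
      have hlen : ((s.drop g).take m.length).length = m.length := by rw [h]
      simp [List.length_take, List.length_drop] at hlen
      exact Or.inl ⟨hpre, by omega⟩
    · have : s.drop g = [] := List.drop_eq_nil_of_le (by omega)
      rw [this] at h
      simp at h
      exact Or.inr ⟨by simpa using h, by omega⟩
  · rintro (⟨h, _⟩ | ⟨h, _⟩)
    · exact (List.prefix_iff_eq_take.mp h).symm
    · subst h; simp

lemma slice_from_add (s m : List Char) (g : Nat) :
    PySem.List.slice s (some ((g : Int) + (m.length : Int))) none = s.drop (g + m.length) := by
  rw [show (g : Int) + (m.length : Int) = ((g + m.length : Nat) : Int) by push_cast; ring,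
    PySem.List.slice_from_natCast]

-- B's backtracking search decides EmbT
lemma containsInOrder_iff : ∀ (segs : List (List Char)) (s : List Char),
    (containsInOrderB s segs = true ↔ EmbT s segs) := by
  intro segs
  induction segs with
  | nil => intro s; simp [containsInOrderB, EmbT]
  | cons m rest ih =>
    intro s
    rw [containsInOrderB, EmbT]
    simp only [List.any_eq_true, List.mem_range, Bool.and_eq_true]
    constructor
    · rintro ⟨g, hgr, hsl, hrec⟩
      rw [slice_from_add] at hrec
      rcases (slice_eq_iff_prefix s m g).mp hsl with ⟨hpre, hfit⟩ | ⟨_, hbad⟩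
      · exact ⟨g, hfit, hpre, (ih _).mp hrec⟩
      · omega
    · rintro ⟨g, h1, h2, h3⟩
      refine ⟨g, by omega, (slice_eq_iff_prefix s m g).mpr (Or.inl ⟨h2, h1⟩), ?_⟩
      rw [slice_from_add]
      exact (ih _).mpr h3

-- consuming the string by slices is the same as tracking an absolute position
lemma embT_shift : ∀ (segs : List (List Char)) (s : List Char) (lo : Nat), lo ≤ s.length →
    (EmbT (s.drop lo) segs ↔ Emb s segs lo s.length) := by
  intro segs
  induction segs with
  | nil => intro s lo _; simp [EmbT, Emb]
  | cons m rest ih =>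
    intro s lo hlo
    rw [EmbT, Emb]
    constructor
    · rintro ⟨g, hfit, hpre, hrec⟩
      have hdd : (s.drop lo).drop g = s.drop (lo + g) := by rw [List.drop_drop]
      have hdd2 : (s.drop lo).drop (g + m.length) = s.drop (lo + g + m.length) := by
        rw [List.drop_drop]; congr 1; omega
      rw [hdd] at hpre
      rw [hdd2] at hrec
      have hdl : (s.drop lo).length = s.length - lo := by simp
      refine ⟨lo + g, by omega, by omega, hpre, ?_⟩
      exact (ih s (lo + g + m.length) (by omega)).mp hrec
    · rintro ⟨i, h1, h2, h3, h4⟩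
      refine ⟨i - lo, by simp; omega, ?_, ?_⟩
      · rw [List.drop_drop, show lo + (i - lo) = i by omega]
        exact h3
      · rw [List.drop_drop, show lo + (i - lo + m.length) = i + m.length by omega]
        exact (ih s (i + m.length) (by omega)).mpr h4

-- characterization of A's value past the first two guards
lemma A_iff (url template : String) (p0 : List Char) (rest : List (List Char))
    (h1 : url.toList.isEmpty = false) (h2 : PySem.Chars.isIn pvSeed template.toList = true)
    (hp : PySem.Chars.splitOn template.toList pvSeed = p0 :: rest) :
    (matches_autofill_url_py url template = true ↔
      PySem.Chars.startswith url.toList p0 = true ∧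
      PySem.Chars.endswith url.toList ((p0 :: rest).getLastD []) = true ∧
      Emb url.toList rest.dropLast p0.length url.toList.length) := by
  unfold matches_autofill_url_py
  simp only [h1, h2, hp, Bool.not_true, Bool.false_eq_true, if_false]
  rw [getLast_eq_getLastD _ (List.cons_ne_nil _ _), slice_one_neg_one]
  by_cases hsw : PySem.Chars.startswith url.toList p0 = true
  · have hplen : p0.length ≤ url.toList.length :=
      ((PySem.Chars.startswith_iff _ _).mp hsw).length_le
    by_cases hew : PySem.Chars.endswith url.toList ((p0 :: rest).getLastD []) = true
    · have hcond : (!PySem.Chars.startswith url.toList p0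
          || !PySem.Chars.endswith url.toList ((p0 :: rest).getLastD [])) = false := by
        rw [hsw, hew]; rfl
      rw [if_neg (by rw [hcond]; simp)]
      rw [goA_iff_emb url.toList rest.dropLast p0.length hplen]
      tauto
    · have hew' : PySem.Chars.endswith url.toList ((p0 :: rest).getLastD []) = false := by
        cases h : PySem.Chars.endswith url.toList ((p0 :: rest).getLastD []) with
        | false => rfl | true => exact absurd h hew
      have hcond : (!PySem.Chars.startswith url.toList p0
          || !PySem.Chars.endswith url.toList ((p0 :: rest).getLastD [])) = true := by
        rw [hew']; simp
      rw [if_pos hcond]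
      constructor
      · intro h; exact absurd h (by simp)
      · rintro ⟨_, h, _⟩; exact absurd h hew
  · have hsw' : PySem.Chars.startswith url.toList p0 = false := by
      cases h : PySem.Chars.startswith url.toList p0 with
      | false => rfl | true => exact absurd h hsw
    have hcond : (!PySem.Chars.startswith url.toList p0
        || !PySem.Chars.endswith url.toList ((p0 :: rest).getLastD [])) = true := by
      rw [hsw']; simp
    rw [if_pos hcond]
    constructor
    · intro h; exact absurd h (by simp)
    · rintro ⟨h, _, _⟩; exact absurd h hsw

-- characterization of B's value past the first two guards
lemma B_iff (url template : String) (p0 r : List Char) (rs : List (List Char))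
    (h1 : url.toList.isEmpty = false) (h2 : PySem.Chars.isIn pvSeed template.toList = true)
    (hp : PySem.Chars.splitOn template.toList pvSeed = p0 :: r :: rs) :
    (matches_autofill_url_py_alt url template = true ↔
      PySem.Chars.startswith url.toList p0 = true ∧
      PySem.Chars.endswith url.toList ((p0 :: r :: rs).getLastD []) = true ∧
      Emb url.toList (r :: rs).dropLast p0.length url.toList.length) := by
  unfold matches_autofill_url_py_alt
  simp only [h1, h2, hp, Bool.not_true, Bool.false_eq_true, if_false]
  rw [show PySem.List.slice (p0 :: r :: rs) none (some (-1)) = (p0 :: r :: rs).dropLast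
      from PySem.List.slice_to_neg_one _,
    show (p0 :: r :: rs).dropLast = p0 :: (r :: rs).dropLast by simp]
  by_cases hew : PySem.Chars.endswith url.toList ((p0 :: r :: rs).getLastD []) = true
  · rw [if_neg (by rw [hew]; simp)]
    rw [show matchFrontB url.toList (p0 :: (r :: rs).dropLast)
        = (if !(PySem.Chars.startswith url.toList p0) then false
           else containsInOrderB (PySem.List.slice url.toList (some (p0.length : Int)) none)
             ((r :: rs).dropLast)) from rfl]
    by_cases hsw : PySem.Chars.startswith url.toList p0 = true
    · have hplen : p0.length ≤ url.toList.length :=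
        ((PySem.Chars.startswith_iff _ _).mp hsw).length_le
      rw [if_neg (by rw [hsw]; simp), PySem.List.slice_from_natCast,
        containsInOrder_iff ((r :: rs).dropLast) _,
        embT_shift ((r :: rs).dropLast) url.toList p0.length hplen]
      tauto
    · have hsw' : PySem.Chars.startswith url.toList p0 = false := by
        cases h : PySem.Chars.startswith url.toList p0 with
        | false => rfl | true => exact absurd h hsw
      rw [if_pos (by rw [hsw']; rfl)]
      constructor
      · intro h; exact absurd h (by simp)
      · rintro ⟨h, _, _⟩; exact absurd h hsw
  · have hew' : PySem.Chars.endswith url.toList ((p0 :: r :: rs).getLastD []) = false := by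
      cases h : PySem.Chars.endswith url.toList ((p0 :: r :: rs).getLastD []) with
      | false => rfl | true => exact absurd h hew
    rw [if_pos (by rw [hew']; rfl)]
    constructor
    · intro h; exact absurd h (by simp)
    · rintro ⟨_, h, _⟩; exact absurd h hew

-- ===== VERDICT (by name: the statement is the Claim_ definition above) =====
theorem matches_autofill_url_py_spec : Claim_equal_matches_autofill_url_py := by
  intro url template _
  unfold Spec_matches_autofill_url_py
  by_cases h1 : url.toList.isEmpty
  · unfold matches_autofill_url_py matches_autofill_url_py_alt
    simp [h1]
  · have h1' : url.toList.isEmpty = false := by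
      cases h : url.toList.isEmpty with
      | false => rfl | true => exact absurd h h1
    by_cases h2 : PySem.Chars.isIn pvSeed template.toList
    · cases hp : PySem.Chars.splitOn template.toList pvSeed with
      | nil =>
        exfalso
        have := splitOn_two template.toList pvSeed (by decide)
          ((PySem.Chars.isIn_iff_infix _ _).mp h2)
        rw [hp] at this
        simp at this
      | cons p0 rest =>
        cases rest with
        | nil =>
          exfalso
          have := splitOn_two template.toList pvSeed (by decide)
            ((PySem.Chars.isIn_iff_infix _ _).mp h2)
          rw [hp] at this
          simp at this
        | cons r rs =>
          have hA := A_iff url template p0 (r :: rs) h1' h2 hp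
          have hB := B_iff url template p0 r rs h1' h2 hp
          cases hAv : matches_autofill_url_py url template with
          | true => exact (hB.mpr (hA.mp hAv)).symm
          | false =>
            cases hBv : matches_autofill_url_py_alt url template with
            | false => rfl
            | true =>
              exfalso
              have := hA.mpr (hB.mp hBv)
              rw [hAv] at this
              exact absurd this (by simp)
    · unfold matches_autofill_url_py matches_autofill_url_py_alt
      have h2' : PySem.Chars.isIn pvSeed template.toList = false := by
        cases h : PySem.Chars.isIn pvSeed template.toList with
        | false => rfl | true => exact absurd h h2
      simp [h1', h2']
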